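-- pv_equiv track=rewrite | github.com/bshlgrs/circuit-solver | nodeRule.py | findCurrentEquivalences
-- ===== SOURCE A (Python) =====
-- def maxnode(shape):
--     return max(max(a,b) for (a,b) in shape)
--
-- def findCurrentEquivalences(shape):
--     outlist=[]
--     for node in range(maxnode(shape)+1):
--         currentsIn = [pos for (pos,(a,b)) in enumerate(shape) if a==node]
--         currentsOut = [pos for (pos,(a,b)) in enumerate(shape) if b==node]
--
--         currentsInCopy= currentsIn
--
--         currentsIn = [x for x in currentsIn if x not in currentsOut]
--         currentsOut = [x for x in currentsOut if x not in currentsInCopy]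
--
--         outlist.append((node,currentsIn,currentsOut))
--     return outlist
-- ===== SOURCE B (Python) =====
-- def findCurrentEquivalences(shape):
--     ins = {}
--     outs = {}
--     for pos, (a, b) in enumerate(shape):
--         if a != b:
--             ins.setdefault(a, []).append(pos)
--             outs.setdefault(b, []).append(pos)
--     top = max(max(a, b) for (a, b) in shape)
--     return [(node, ins.get(node, []), outs.get(node, []))
--             for node in range(top + 1)]
-- ===== Notes on version B (the rewrite author's own statement) =====
-- stated objective: faster
-- what changed: A rescans the whole edge list (four comprehensions plus quadratic 'not in' membership tests) for every node from 0 to maxnode; B makes one pass over the edges building node->positions dicts for incoming and outgoing endpoints while skipping self-loop edges, then just looks each node up.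
import Mathlib
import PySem

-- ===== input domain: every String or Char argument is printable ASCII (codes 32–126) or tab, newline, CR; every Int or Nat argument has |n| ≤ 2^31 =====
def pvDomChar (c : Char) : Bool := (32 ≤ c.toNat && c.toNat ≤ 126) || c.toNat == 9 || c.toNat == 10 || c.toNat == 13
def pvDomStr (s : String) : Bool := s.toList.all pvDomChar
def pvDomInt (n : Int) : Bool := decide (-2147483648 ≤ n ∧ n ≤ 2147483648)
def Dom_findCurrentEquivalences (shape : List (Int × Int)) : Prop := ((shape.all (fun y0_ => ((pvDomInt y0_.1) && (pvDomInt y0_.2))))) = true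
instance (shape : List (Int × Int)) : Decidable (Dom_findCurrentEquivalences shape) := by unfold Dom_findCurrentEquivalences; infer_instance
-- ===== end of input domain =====

-- B replaces A's per-node scans of the whole edge list by one pass building node→positions
-- dicts with self-loop edges skipped (objective: faster).

-- ===== PORT A =====
def maxnode (shape : List (Int × Int)) : Option Int :=
  PySem.List.max? (shape.map (fun p => max p.1 p.2)) (fun x => x)

def findCurrentEquivalences (shape : List (Int × Int)) : List (Int × List Int × List Int) :=
  match maxnode shape with
  | none => []   -- Python: max() of an empty generator raises ValueError; excluded by Pre_
  | some m =>
    (PySem.List.pyRange 0 (m + 1) 1).map (fun node =>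
      let currentsIn := ((PySem.List.enumerate shape).filter (fun p => p.2.1 == node)).map (·.1)
      let currentsOut := ((PySem.List.enumerate shape).filter (fun p => p.2.2 == node)).map (·.1)
      let currentsInCopy := currentsIn
      let currentsIn2 := currentsIn.filter (fun x => !(currentsOut.contains x))
      let currentsOut2 := currentsOut.filter (fun x => !(currentsInCopy.contains x))
      (node, currentsIn2, currentsOut2))

-- ===== PORT B =====
def findCurrentEquivalences_alt (shape : List (Int × Int)) : List (Int × List Int × List Int) :=
  let dicts := (PySem.List.enumerate shape).foldl
    (fun (s : PySem.Dict Int (List Int) × PySem.Dict Int (List Int)) p =>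
      if p.2.1 ≠ p.2.2 then
        (s.1.modify p.2.1 [] (· ++ [p.1]), s.2.modify p.2.2 [] (· ++ [p.1]))
      else s)
    (PySem.Dict.empty, PySem.Dict.empty)
  match PySem.List.max? (shape.map (fun p => max p.1 p.2)) (fun x => x) with
  | none => []   -- Python: max() of an empty generator raises ValueError; excluded by Pre_
  | some top =>
    (PySem.List.pyRange 0 (top + 1) 1).map (fun node =>
      (node, dicts.1.getD node [], dicts.2.getD node []))

-- ===== PRECONDITION & SPEC =====
-- Pre_ excludes only the empty edge list, on which both Pythons raise ValueError (max of empty sequence).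
def Pre_findCurrentEquivalences (shape : List (Int × Int)) : Prop := shape ≠ []
instance (shape : List (Int × Int)) : Decidable (Pre_findCurrentEquivalences shape) := by unfold Pre_findCurrentEquivalences; infer_instance
def pvWitness_findCurrentEquivalences : (List (Int × Int)) := [(0, 1)]

def Spec_findCurrentEquivalences (shape : List (Int × Int)) (out : List (Int × List Int × List Int)) : Prop := out = findCurrentEquivalences_alt shape
instance (shape : List (Int × Int)) (out : List (Int × List Int × List Int)) : Decidable (Spec_findCurrentEquivalences shape out) := by unfold Spec_findCurrentEquivalences; infer_instance

-- ===== CLAIM (what is proved, stated in full; the proofs are below) =====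
def Claim_equal_findCurrentEquivalences : Prop := ∀ (shape : List (Int × Int)), Dom_findCurrentEquivalences shape → Pre_findCurrentEquivalences shape → Spec_findCurrentEquivalences shape (findCurrentEquivalences shape)

-- ===== LEMMAS AND PROOFS =====

-- the canonical per-node lists: positions of non-self-loop edges entering / leaving the node
def canonIn (shape : List (Int × Int)) (node : Int) : List Int :=
  ((PySem.List.enumerate shape).filter (fun p => p.2.1 == node && !(p.2.2 == node))).map (·.1)

def canonOut (shape : List (Int × Int)) (node : Int) : List Int :=
  ((PySem.List.enumerate shape).filter (fun p => p.2.2 == node && !(p.2.1 == node))).map (·.1)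

-- the fold over the pair of dicts is the pair of the two independent folds
theorem pairFoldSpec (l : List (Int × (Int × Int))) (d1 d2 : PySem.Dict Int (List Int)) :
    l.foldl (fun s p =>
        if p.2.1 ≠ p.2.2 then
          (s.1.modify p.2.1 [] (· ++ [p.1]), s.2.modify p.2.2 [] (· ++ [p.1]))
        else s) (d1, d2)
      = (l.foldl (fun d p => if p.2.1 ≠ p.2.2 then d.modify p.2.1 [] (· ++ [p.1]) else d) d1,
         l.foldl (fun d p => if p.2.1 ≠ p.2.2 then d.modify p.2.2 [] (· ++ [p.1]) else d) d2) := by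
  induction l generalizing d1 d2 with
  | nil => rfl
  | cons h t ih =>
    simp only [List.foldl_cons]
    by_cases hc : h.2.1 = h.2.2
    · rw [if_neg (fun hn => hn hc), if_neg (fun hn => hn hc), if_neg (fun hn => hn hc)]
      exact ih d1 d2
    · rw [if_pos hc, if_pos hc, if_pos hc]
      exact ih _ _

-- the fst components of PySem.List.enumerate are injective on its members
theorem enumerate_fst_inj {α : Type} (xs : List α) (s : Int) (p q : Int × α)
    (hp : p ∈ PySem.List.enumerate xs s) (hq : q ∈ PySem.List.enumerate xs s)
    (h : p.1 = q.1) : p = q := by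
  rw [PySem.List.mem_enumerate_iff] at hp hq
  obtain ⟨k, hk, rfl⟩ := hp
  obtain ⟨j, hj, rfl⟩ := hq
  simp only at h
  have : k = j := by omega
  subst this; rfl

-- membership in the mapped-fst filtered enumerate list, for p itself in the enumerate list
theorem contains_filter_map_fst (shape : List (Int × Int)) (Q : Int × (Int × Int) → Bool)
    (p : Int × (Int × Int)) (hp : p ∈ PySem.List.enumerate shape 0) :
    (((PySem.List.enumerate shape).filter Q).map (·.1)).contains p.1 = Q p := by
  by_cases hQ : Q p = true
  · simp only [hQ]
    rw [List.contains_eq_mem]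
    simp only [decide_eq_true_eq, List.mem_map]
    exact ⟨p, List.mem_filter.mpr ⟨hp, hQ⟩, rfl⟩
  · simp only [Bool.not_eq_true] at hQ
    simp only [hQ]
    rw [List.contains_eq_mem]
    simp only [decide_eq_false_iff_not, List.mem_map, not_exists]
    rintro q ⟨hq, hfst⟩
    rcases List.mem_filter.mp hq with ⟨hqmem, hQq⟩
    have := enumerate_fst_inj shape 0 q p hqmem hp hfst
    subst this
    simp [hQq] at hQ

-- A's results, in canonical form
theorem a_eq (shape : List (Int × Int)) :
    findCurrentEquivalences shape
      = match PySem.List.max? (shape.map (fun p => max p.1 p.2)) (fun x => x) with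
        | none => []
        | some m =>
          (PySem.List.pyRange 0 (m + 1) 1).map (fun node =>
            (node, canonIn shape node, canonOut shape node)) := by
  unfold findCurrentEquivalences maxnode
  cases ht : PySem.List.max? (shape.map (fun p => max p.1 p.2)) (fun x => x) with
  | none => simp
  | some m =>
    simp only
    apply List.map_congr_left
    intro node _
    refine Prod.ext rfl (Prod.ext ?_ ?_) <;> simp only
    · unfold canonIn
      rw [List.filter_map, List.filter_filter]
      congr 1
      apply List.filter_congr
      intro p hp
      simp only [Function.comp]
      rw [contains_filter_map_fst shape _ p hp]
      rw [Bool.eq_iff_iff]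
      simp only [Bool.and_eq_true, Bool.not_eq_true', beq_iff_eq, beq_eq_false_iff_ne]
      omega
    · unfold canonOut
      rw [List.filter_map, List.filter_filter]
      congr 1
      apply List.filter_congr
      intro p hp
      simp only [Function.comp]
      rw [contains_filter_map_fst shape _ p hp]
      rw [Bool.eq_iff_iff]
      simp only [Bool.and_eq_true, Bool.not_eq_true', beq_iff_eq, beq_eq_false_iff_ne]
      omega

-- B's grouping fold, looked up at a node, in canonical form (key picks the endpoint)
theorem bFold (shape : List (Int × Int)) (node : Int) (key : Int × (Int × Int) → Int) :
    (((PySem.List.enumerate shape).foldl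
        (fun (d : PySem.Dict Int (List Int)) p =>
          if p.2.1 ≠ p.2.2 then d.modify (key p) [] (· ++ [p.1]) else d)
        PySem.Dict.empty).getD node [])
      = ((PySem.List.enumerate shape).filter
          (fun p => key p == node && !(p.2.1 == p.2.2))).map (·.1) := by
  have h1 : (fun (d : PySem.Dict Int (List Int)) (p : Int × (Int × Int)) =>
        if p.2.1 ≠ p.2.2 then d.modify (key p) [] (· ++ [p.1]) else d)
      = (fun d p => if (p.2.1 != p.2.2) then d.modify (key p) [] (· ++ [p.1]) else d) := by
    funext d p
    by_cases h : p.2.1 = p.2.2 <;> simp [h]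
  rw [h1, ← List.foldl_filter]
  have hmap : ((PySem.List.enumerate shape).filter (fun p => p.2.1 != p.2.2)).foldl
      (fun (d : PySem.Dict Int (List Int)) p => d.modify (key p) [] (· ++ [p.1])) PySem.Dict.empty
    = (((PySem.List.enumerate shape).filter (fun p => p.2.1 != p.2.2)).map
        (fun p => (key p, p.1))).foldl
      (fun (d : PySem.Dict Int (List Int)) q => d.modify q.1 [] (· ++ [q.2])) PySem.Dict.empty := by
    rw [List.foldl_map]
  rw [hmap, PySem.Dict.getD_foldl_modify_append]
  rw [List.filter_map, List.map_map]
  simp only [Function.comp, PySem.Dict.getD_empty, List.nil_append, List.filter_filter]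
  rfl

-- bFold at the two concrete keys (definitional instantiations)
theorem bFoldIn (shape : List (Int × Int)) (node : Int) :
    (((PySem.List.enumerate shape).foldl
        (fun (d : PySem.Dict Int (List Int)) p =>
          if p.2.1 ≠ p.2.2 then d.modify p.2.1 [] (· ++ [p.1]) else d)
        PySem.Dict.empty).getD node [])
      = ((PySem.List.enumerate shape).filter
          (fun p => p.2.1 == node && !(p.2.1 == p.2.2))).map (·.1) :=
  bFold shape node (fun p => p.2.1)

theorem bFoldOut (shape : List (Int × Int)) (node : Int) :
    (((PySem.List.enumerate shape).foldl
        (fun (d : PySem.Dict Int (List Int)) p =>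
          if p.2.1 ≠ p.2.2 then d.modify p.2.2 [] (· ++ [p.1]) else d)
        PySem.Dict.empty).getD node [])
      = ((PySem.List.enumerate shape).filter
          (fun p => p.2.2 == node && !(p.2.1 == p.2.2))).map (·.1) :=
  bFold shape node (fun p => p.2.2)

-- B's results, in canonical form
theorem b_eq (shape : List (Int × Int)) :
    findCurrentEquivalences_alt shape
      = match PySem.List.max? (shape.map (fun p => max p.1 p.2)) (fun x => x) with
        | none => []
        | some m =>
          (PySem.List.pyRange 0 (m + 1) 1).map (fun node =>
            (node, canonIn shape node, canonOut shape node)) := by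
  unfold findCurrentEquivalences_alt
  cases ht : PySem.List.max? (shape.map (fun p => max p.1 p.2)) (fun x => x) with
  | none => simp
  | some m =>
    simp only
    apply List.map_congr_left
    intro node _
    rw [pairFoldSpec]
    refine Prod.ext rfl (Prod.ext ?_ ?_) <;> simp only
    · rw [bFoldIn shape node]
      unfold canonIn
      congr 1
      apply List.filter_congr
      intro p _
      rw [Bool.eq_iff_iff]
      simp only [Bool.and_eq_true, Bool.not_eq_true', beq_iff_eq, beq_eq_false_iff_ne]
      omega
    · rw [bFoldOut shape node]
      unfold canonOut
      congr 1
      apply List.filter_congr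
      intro p _
      rw [Bool.eq_iff_iff]
      simp only [Bool.and_eq_true, Bool.not_eq_true', beq_iff_eq, beq_eq_false_iff_ne]
      omega

-- ===== VERDICT (by name: the statement is the Claim_ definition above) =====
theorem findCurrentEquivalences_spec : Claim_equal_findCurrentEquivalences := by
  intro shape _ _
  unfold Spec_findCurrentEquivalences
  rw [a_eq, b_eq]
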